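-- pv_equiv track=rewrite | github.com/rasoul6094/DNS_Tunnel | dns_utils.py | max_base32_payload_len
-- ===== SOURCE A (Python) =====
-- def max_base32_payload_len(domain_suffix="tunnel.domain.com", id_len=2):
--     MAX_FQDN_LEN = 253
--     MAX_LABEL_LEN = 63
--
--     fixed_len = id_len + 1  # ID + dot
--     for label in domain_suffix.split("."):
--         fixed_len += len(label) + 1  # each label + dot
--
--     remaining = MAX_FQDN_LEN - fixed_len
--
--     # How many full 63-char labels fit?
--     num_labels = remaining // (MAX_LABEL_LEN + 1)  # +1 for dot between each
--     leftover = remaining % (MAX_LABEL_LEN + 1)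
--
--     # Can we squeeze in a partial label (if leftover allows)?
--     extra = min(leftover, MAX_LABEL_LEN)
--
--     # total number of base32 characters you can fit
--     return num_labels * MAX_LABEL_LEN + extra
-- ===== SOURCE B (Python) =====
-- def max_base32_payload_len(domain_suffix="tunnel.domain.com", id_len=2):
--     # closed form: the split-sum loop always adds len(domain_suffix) + 1
--     remaining = 251 - id_len - len(domain_suffix)
--     return remaining - remaining // 64
-- ===== Notes on version B (the rewrite author's own statement) =====
-- stated objective: simpler
-- what changed: Replaces the loop summing len(label)+1 over the dot-separated labels, and the num_labels/leftover/min arithmetic, with a two-line closed form: remaining = 251 - id_len - len(domain_suffix), result = remaining - remaining // 64.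
import Mathlib
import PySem

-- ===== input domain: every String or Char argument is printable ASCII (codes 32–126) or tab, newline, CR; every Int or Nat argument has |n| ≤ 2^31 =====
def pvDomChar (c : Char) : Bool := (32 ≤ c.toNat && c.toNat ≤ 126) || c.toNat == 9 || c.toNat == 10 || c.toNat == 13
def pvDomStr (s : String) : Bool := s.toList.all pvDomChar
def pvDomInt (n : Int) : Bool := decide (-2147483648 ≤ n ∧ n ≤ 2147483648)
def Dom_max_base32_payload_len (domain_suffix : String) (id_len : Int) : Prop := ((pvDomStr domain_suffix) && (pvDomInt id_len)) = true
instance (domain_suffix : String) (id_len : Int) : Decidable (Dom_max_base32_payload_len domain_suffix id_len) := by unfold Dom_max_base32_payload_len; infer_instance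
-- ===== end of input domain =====

-- B replaces A's per-label summing loop and min/mod arithmetic by a closed form (simpler).


-- ===== PORT A =====
-- Python: loop over domain_suffix.split(".") summing len(label)+1
def max_base32_payload_len (domain_suffix : String) (id_len : Int) : Int :=
  let fixed_len : Int :=
    (PySem.Chars.splitOn domain_suffix.toList ['.']).foldl
      (fun acc label => acc + (label.length : Int) + 1) (id_len + 1)
  let remaining : Int := 253 - fixed_len
  let num_labels := PySem.Int.floordiv remaining (63 + 1)
  let leftover := PySem.Int.mod remaining (63 + 1)
  let extra := min leftover 63
  num_labels * 63 + extra

-- ===== PORT B =====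
-- B: closed form, no iteration over labels
def max_base32_payload_len_alt (domain_suffix : String) (id_len : Int) : Int :=
  let remaining : Int := 251 - id_len - (domain_suffix.toList.length : Int)
  remaining - PySem.Int.floordiv remaining 64

-- ===== PRECONDITION & SPEC =====
def Spec_max_base32_payload_len (domain_suffix : String) (id_len : Int) (out : Int) : Prop := out = max_base32_payload_len_alt domain_suffix id_len
instance (domain_suffix : String) (id_len : Int) (out : Int) : Decidable (Spec_max_base32_payload_len domain_suffix id_len out) := by unfold Spec_max_base32_payload_len; infer_instance

-- ===== CLAIM (what is proved, stated in full; the proofs are below) =====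
def Claim_equal_max_base32_payload_len : Prop := ∀ (domain_suffix : String) (id_len : Int), Dom_max_base32_payload_len domain_suffix id_len → Spec_max_base32_payload_len domain_suffix id_len (max_base32_payload_len domain_suffix id_len)

-- ===== LEMMAS AND PROOFS =====

-- sum of (len+1) over splitOn-by-one-char parts, via the go invariant
theorem splitOn_go_sum (fuel : Nat) (l cur : List Char) (acc : List (List Char))
    (h : l.length ≤ fuel) :
    ((PySem.Chars.splitOn.go ['.'] fuel l cur acc).map (fun p => p.length + 1)).sum
      = l.length + cur.length + 1 + ((acc.map (fun p => p.length + 1)).sum) := by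
  induction fuel generalizing l cur acc with
  | zero =>
    have : l = [] := List.length_eq_zero_iff.mp (Nat.le_zero.mp h)
    subst this
    simp [PySem.Chars.splitOn.go]; omega
  | succ n ih =>
    cases l with
    | nil => simp [PySem.Chars.splitOn.go]; omega
    | cons c rest =>
      simp only [PySem.Chars.splitOn.go]
      split
      · rw [ih] <;> simp_all <;> omega
      · rw [ih] <;> simp_all <;> omega

theorem splitOn_sum (s : List Char) :
    ((PySem.Chars.splitOn s ['.']).map (fun p => p.length + 1)).sum = s.length + 1 := by
  unfold PySem.Chars.splitOn
  rw [splitOn_go_sum] <;> simp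

theorem foldl_len_sum (parts : List (List Char)) (a : Int) :
    parts.foldl (fun acc label => acc + (label.length : Int) + 1) a
      = a + ((parts.map (fun p => p.length + 1)).sum : Nat) := by
  induction parts generalizing a with
  | nil => simp
  | cons p t ih => simp [ih]; ring

-- ===== VERDICT (by name: the statement is the Claim_ definition above) =====
theorem max_base32_payload_len_spec : Claim_equal_max_base32_payload_len := by
  intro s i _
  unfold Spec_max_base32_payload_len max_base32_payload_len max_base32_payload_len_alt
  simp only [foldl_len_sum, splitOn_sum]
  push_cast
  set L : Int := (s.toList.length : Int) with hL
  have hrem : (253 : Int) - (i + 1 + (L + 1)) = 251 - i - L := by ring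
  rw [hrem]
  set r : Int := 251 - i - L with hr
  have h1 := PySem.Int.floordiv_mul_add_mod r 64
  have h2 := PySem.Int.mod_nonneg r (b := 64) (by norm_num)
  have h3 := PySem.Int.mod_lt r (b := 64) (by norm_num)
  omega
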